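-- pv_equiv track=rewrite | github.com/zackeua/AdventOfCode | 2023/dag7/7_2.py | hand_to_num
-- ===== SOURCE A (Python) =====
-- def hand_to_num(hand):
--     total = 0
--     for val in hand:
--         total *= 14
--         if val == 'A':
--             total += 13
--         elif val == 'K':
--             total += 12
--         elif val == 'Q':
--             total += 11
--         elif val == 'J':
--             total += 0
--         elif val == 'T':
--             total += 10
--         else:
--             total += int(val)
--     return total
-- ===== SOURCE B (Python) =====
-- CARD_VALUES = {'0': 0, '1': 1, '2': 2, '3': 3, '4': 4, '5': 5, '6': 6,
--                '7': 7, '8': 8, '9': 9, 'T': 10, 'J': 0, 'Q': 11, 'K': 12, 'A': 13}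
--
--
-- def hand_to_num(hand):
--     return sum(CARD_VALUES[c] * 14 ** i for i, c in enumerate(reversed(hand)))
-- ===== Notes on version B (the rewrite author's own statement) =====
-- stated objective: idiomatic
-- what changed: Replaces the Horner accumulator loop with an if/elif chain by a module-level card-value table and a one-line positional sum over enumerate(reversed(hand)) with explicit powers of 14.
import Mathlib
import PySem

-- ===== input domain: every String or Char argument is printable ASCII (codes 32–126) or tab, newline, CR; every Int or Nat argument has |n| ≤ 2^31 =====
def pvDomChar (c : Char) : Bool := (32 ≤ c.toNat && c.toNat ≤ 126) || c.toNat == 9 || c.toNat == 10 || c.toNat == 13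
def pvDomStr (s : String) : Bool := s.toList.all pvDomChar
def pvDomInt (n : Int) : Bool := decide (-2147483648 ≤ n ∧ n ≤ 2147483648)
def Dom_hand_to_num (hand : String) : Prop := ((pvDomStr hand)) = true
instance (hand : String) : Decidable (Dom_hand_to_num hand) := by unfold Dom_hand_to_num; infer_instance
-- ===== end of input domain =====

-- B replaces A's Horner accumulator loop with a card-value table and a positional
-- sum over the reversed hand with explicit powers of 14 (idiomatic, same cost).

-- ===== PORT A =====
def hand_to_num (hand : String) : Int :=
  hand.toList.foldl (fun total val =>
    let total := total * 14
    if val = 'A' then total + 13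
    else if val = 'K' then total + 12
    else if val = 'Q' then total + 11
    else if val = 'J' then total + 0
    else if val = 'T' then total + 10
    else total + (PySem.Int.ofStr? (String.ofList [val])).getD 0) 0
    -- int(val) raises ValueError (ofStr? = none) on non-digit chars; excluded by Pre_

-- ===== PORT B =====
def pvCardValues : PySem.Dict Char Int :=
  PySem.Dict.ofList [('0', 0), ('1', 1), ('2', 2), ('3', 3), ('4', 4), ('5', 5), ('6', 6),
   ('7', 7), ('8', 8), ('9', 9), ('T', 10), ('J', 0), ('Q', 11), ('K', 12), ('A', 13)]

def hand_to_num_alt (hand : String) : Int :=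
  ((PySem.List.enumerate hand.toList.reverse).map
    (fun p => (PySem.Dict.get? pvCardValues p.2).getD 0 * 14 ^ p.1.toNat)).sum
    -- CARD_VALUES[c] raises KeyError (get? = none) on unknown chars; excluded by Pre_

-- ===== PRECONDITION & SPEC =====
-- Pre_: exactly the hands on which A returns (any other character makes int(val) raise ValueError).
def Pre_hand_to_num (hand : String) : Prop :=
  (hand.toList.all (fun c => c ∈ ['A','K','Q','J','T','0','1','2','3','4','5','6','7','8','9'])) = true
instance (hand : String) : Decidable (Pre_hand_to_num hand) := by
  unfold Pre_hand_to_num; infer_instance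
def pvWitness_hand_to_num : String := "A2"

def Spec_hand_to_num (hand : String) (out : Int) : Prop := out = hand_to_num_alt hand
instance (hand : String) (out : Int) : Decidable (Spec_hand_to_num hand out) := by
  unfold Spec_hand_to_num; infer_instance

-- ===== CLAIM (what is proved, stated in full; the proofs are below) =====
def Claim_equal_hand_to_num : Prop :=
  ∀ (hand : String), Dom_hand_to_num hand → Pre_hand_to_num hand →
    Spec_hand_to_num hand (hand_to_num hand)

-- ===== LEMMAS AND PROOFS =====

-- value of one card, as B computes it
def pvVal (c : Char) : Int := (PySem.Dict.get? pvCardValues c).getD 0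

-- A's step equals "times 14 plus the card value" on every admitted character
lemma pvStep_eq (c : Char) (h : c ∈ ['A','K','Q','J','T','0','1','2','3','4','5','6','7','8','9']) (t : Int) :
    (let t' := t * 14;
      if c = 'A' then t' + 13
      else if c = 'K' then t' + 12
      else if c = 'Q' then t' + 11
      else if c = 'J' then t' + 0
      else if c = 'T' then t' + 10
      else t' + (PySem.Int.ofStr? (String.ofList [c])).getD 0) = t * 14 + pvVal c := by
  fin_cases h <;> simp [pvVal] <;> decide

-- B's sum, as a function of a char list (hand reversed inside)
def pvSum (l : List Char) : Int :=
  ((PySem.List.enumerate l.reverse).map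
    (fun p => pvVal p.2 * 14 ^ p.1.toNat)).sum

lemma pvSum_cons (c : Char) (l : List Char) :
    pvSum (c :: l) = pvVal c * 14 ^ l.length + pvSum l := by
  simp [pvSum, PySem.List.enumerate_append, PySem.List.enumerate_cons]
  ring

lemma pvHorner (l : List Char) (hl : ∀ c ∈ l, c ∈ ['A','K','Q','J','T','0','1','2','3','4','5','6','7','8','9']) :
    ∀ t : Int,
      l.foldl (fun total val =>
        let total := total * 14
        if val = 'A' then total + 13
        else if val = 'K' then total + 12
        else if val = 'Q' then total + 11
        else if val = 'J' then total + 0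
        else if val = 'T' then total + 10
        else total + (PySem.Int.ofStr? (String.ofList [val])).getD 0) t
      = t * 14 ^ l.length + pvSum l := by
  induction l with
  | nil => intro t; simp [pvSum]
  | cons c l ih =>
    intro t
    have hc := hl c (by simp)
    have hrest : ∀ x ∈ l, x ∈ ['A','K','Q','J','T','0','1','2','3','4','5','6','7','8','9'] := fun x hx => hl x (by simp [hx])
    simp only [List.foldl_cons]
    rw [pvStep_eq c hc t, ih hrest, pvSum_cons]
    simp [pow_succ]
    ring

-- ===== VERDICT (by name: the statement is the Claim_ definition above) =====
theorem hand_to_num_spec : Claim_equal_hand_to_num := by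
  intro hand _ hpre
  unfold Pre_hand_to_num at hpre
  simp only [List.all_eq_true, decide_eq_true_eq] at hpre
  unfold Spec_hand_to_num hand_to_num hand_to_num_alt
  have := pvHorner hand.toList hpre 0
  simp only [zero_mul, zero_add] at this
  rw [this]
  rfl
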